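-- pv_equiv track=rewrite | github.com/douzujun/Python-Foundation-Suda | 上机和面试/Python-Foundation-Suda-master/05_leetcode/1276_!!方程_不浪费原料的汉堡制作方案.py | numOfBurgers
-- ===== SOURCE A (Python) =====
-- def numOfBurgers(tomatoSlices: int, cheeseSlices: int) ->list:
--     # 超时
--     ans = []
--     for b in range(cheeseSlices+1):
--         s = cheeseSlices - b
--         if 4*b + 2*s == tomatoSlices:
--             ans = [b, s]
--             break
--     return ans
-- ===== SOURCE B (Python) =====
-- def numOfBurgers(tomatoSlices: int, cheeseSlices: int) -> list:
--     # Solve the 2x2 system b + s = cheese, 4b + 2s = tomato in closed form.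
--     if tomatoSlices % 2 == 0 and 2 * cheeseSlices <= tomatoSlices <= 4 * cheeseSlices:
--         b = (tomatoSlices - 2 * cheeseSlices) // 2
--         return [b, cheeseSlices - b]
--     return []
-- ===== Notes on version B (the rewrite author's own statement) =====
-- stated objective: faster
-- what changed: Replaced the linear scan over all candidate double-burger counts with the closed-form solution of the 2x2 linear system, validated for a non-negative integer solution.
import Mathlib
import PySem

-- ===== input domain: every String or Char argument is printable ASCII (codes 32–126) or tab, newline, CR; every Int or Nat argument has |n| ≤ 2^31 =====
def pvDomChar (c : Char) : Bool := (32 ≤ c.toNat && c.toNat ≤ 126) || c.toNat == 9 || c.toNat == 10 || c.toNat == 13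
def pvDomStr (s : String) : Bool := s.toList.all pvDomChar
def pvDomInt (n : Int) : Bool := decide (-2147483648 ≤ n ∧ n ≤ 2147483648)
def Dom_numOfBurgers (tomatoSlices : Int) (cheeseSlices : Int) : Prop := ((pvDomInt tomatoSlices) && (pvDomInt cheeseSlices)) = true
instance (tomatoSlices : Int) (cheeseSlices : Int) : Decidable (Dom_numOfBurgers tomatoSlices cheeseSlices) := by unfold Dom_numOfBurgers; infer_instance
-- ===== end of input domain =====

-- B replaces A's linear scan over candidate counts with the closed-form solution
-- of the 2x2 linear system (faster: O(1) instead of O(cheeseSlices)).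


-- ===== PORT A =====
-- the for-loop with break: first b in the range with 4*b + 2*s == tomatoSlices
def numOfBurgersGo (tomatoSlices cheeseSlices : Int) : List Int → List Int
  | [] => []
  | b :: rest =>
      let s := cheeseSlices - b
      if 4 * b + 2 * s = tomatoSlices then [b, s]
      else numOfBurgersGo tomatoSlices cheeseSlices rest

def numOfBurgers (tomatoSlices : Int) (cheeseSlices : Int) : List Int :=
  numOfBurgersGo tomatoSlices cheeseSlices (PySem.List.pyRange 0 (cheeseSlices + 1) 1)

-- ===== PORT B =====
def numOfBurgers_alt (tomatoSlices : Int) (cheeseSlices : Int) : List Int :=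
  if PySem.Int.mod tomatoSlices 2 = 0 ∧ 2 * cheeseSlices ≤ tomatoSlices ∧ tomatoSlices ≤ 4 * cheeseSlices then
    let b := PySem.Int.floordiv (tomatoSlices - 2 * cheeseSlices) 2
    [b, cheeseSlices - b]
  else []

-- ===== PRECONDITION & SPEC =====
def Spec_numOfBurgers (tomatoSlices : Int) (cheeseSlices : Int) (out : List Int) : Prop := out = numOfBurgers_alt tomatoSlices cheeseSlices
instance (tomatoSlices : Int) (cheeseSlices : Int) (out : List Int) : Decidable (Spec_numOfBurgers tomatoSlices cheeseSlices out) := by unfold Spec_numOfBurgers; infer_instance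

-- ===== CLAIM (what is proved, stated in full; the proofs are below) =====
def Claim_equal_numOfBurgers : Prop := ∀ (tomatoSlices : Int) (cheeseSlices : Int), Dom_numOfBurgers tomatoSlices cheeseSlices → Spec_numOfBurgers tomatoSlices cheeseSlices (numOfBurgers tomatoSlices cheeseSlices)

-- ===== LEMMAS AND PROOFS =====

-- If no element of the list satisfies the loop's test, the loop returns [].
theorem numOfBurgersGo_nil (t c : Int) (l : List Int)
    (h : ∀ b ∈ l, 2 * b ≠ t - 2 * c) :
    numOfBurgersGo t c l = [] := by
  induction l with
  | nil => rfl
  | cons x rest ih =>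
      have hx := h x (by simp)
      simp only [numOfBurgersGo]
      rw [if_neg (by omega)]
      exact ih (fun b hb => h b (by simp [hb]))

-- If the (unique) solution b0 is in the list, the loop returns [b0, c - b0].
theorem numOfBurgersGo_finds (t c b0 : Int) (l : List Int)
    (hmem : b0 ∈ l) (hb0 : 2 * b0 = t - 2 * c) :
    numOfBurgersGo t c l = [b0, c - b0] := by
  induction l with
  | nil => simp at hmem
  | cons x rest ih =>
      simp only [numOfBurgersGo]
      by_cases hx : 4 * x + 2 * (c - x) = t
      · have : x = b0 := by omega
        rw [if_pos hx, this]
      · rw [if_neg hx]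
        rcases List.mem_cons.mp hmem with h | h
        · omega
        · exact ih h

-- ===== VERDICT (by name: the statement is the Claim_ definition above) =====
theorem numOfBurgers_spec : Claim_equal_numOfBurgers := by
  intro t c _
  unfold Spec_numOfBurgers numOfBurgers numOfBurgers_alt
  have hmod : PySem.Int.mod t 2 = t % 2 := PySem.Int.mod_eq_emod_of_pos (by omega)
  have hdiv : PySem.Int.floordiv (t - 2 * c) 2 = (t - 2 * c) / 2 :=
    PySem.Int.floordiv_eq_ediv_of_pos (by omega)
  by_cases h : PySem.Int.mod t 2 = 0 ∧ 2 * c ≤ t ∧ t ≤ 4 * c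
  · rw [if_pos h]
    obtain ⟨he, hlo, hhi⟩ := h
    rw [hmod] at he
    rw [hdiv]
    set b0 := (t - 2 * c) / 2 with hb0def
    have hb0 : 2 * b0 = t - 2 * c := by omega
    exact numOfBurgersGo_finds t c b0 _
      (by rw [PySem.List.mem_pyRange_one]; omega) hb0
  · rw [if_neg h]
    rw [hmod] at h
    refine numOfBurgersGo_nil t c _ (fun b hb hbad => ?_)
    rw [PySem.List.mem_pyRange_one] at hb
    apply h
    omega
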